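-- pv_equiv track=rewrite | github.com/Adam-Calleja/Polaris | src/polaris_rag/evaluation/experiment_automation.py | _metric_names_from_rows
-- ===== SOURCE A (Python) =====
-- from typing import Any, Iterable, Mapping, Sequence
--
-- DEFAULT_PRIMARY_METRICS: tuple[str, ...] = (
--     "factual_correctness",
--     "faithfulness",
--     "context_recall",
--     "context_precision_without_reference",
-- )
--
-- def _metric_names_from_rows(rows: Sequence[Mapping[str, Any]]) -> list[str]:
--     discovered: set[str] = set()
--     structural = {
--         "stage_name",
--         "condition_name",
--         "condition_slug",
--         "repeat_index",
--         "run_dir",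
--         "config_file",
--         "preset_name",
--         "condition_fingerprint",
--         "rows",
--         "duration_seconds",
--         "failure_rate",
--         "selected_max_workers",
--     }
--     for row in rows:
--         for key in row.keys():
--             if key not in structural:
--                 discovered.add(str(key))
--     ordered = [name for name in DEFAULT_PRIMARY_METRICS if name in discovered]
--     ordered.extend(sorted(name for name in discovered if name not in DEFAULT_PRIMARY_METRICS))
--     return ordered
-- ===== SOURCE B (Python) =====
-- DEFAULT_PRIMARY_METRICS: tuple[str, ...] = (
--     "factual_correctness",
--     "faithfulness",
--     "context_recall",
--     "context_precision_without_reference",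
-- )
--
-- _STRUCTURAL = frozenset({
--     "stage_name",
--     "condition_name",
--     "condition_slug",
--     "repeat_index",
--     "run_dir",
--     "config_file",
--     "preset_name",
--     "condition_fingerprint",
--     "rows",
--     "duration_seconds",
--     "failure_rate",
--     "selected_max_workers",
-- })
--
-- _RANK = {name: i for i, name in enumerate(DEFAULT_PRIMARY_METRICS)}
-- _FALLBACK = len(DEFAULT_PRIMARY_METRICS)
--
-- def _metric_names_from_rows(rows):
--     discovered = {str(key) for row in rows for key in row.keys()} - _STRUCTURAL
--     return sorted(discovered, key=lambda name: (_RANK.get(name, _FALLBACK), name))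
-- ===== Notes on version B (the rewrite author's own statement) =====
-- stated objective: alternative
-- what changed: A's per-key filtered set-building loop and its two-phase output (filter primaries in declared order, then append the sorted remainder) are replaced by one flat key-set union minus the structural set and a single sort under a composite (rank, name) key that puts primaries first by declared rank and the rest alphabetically.
import Mathlib
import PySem

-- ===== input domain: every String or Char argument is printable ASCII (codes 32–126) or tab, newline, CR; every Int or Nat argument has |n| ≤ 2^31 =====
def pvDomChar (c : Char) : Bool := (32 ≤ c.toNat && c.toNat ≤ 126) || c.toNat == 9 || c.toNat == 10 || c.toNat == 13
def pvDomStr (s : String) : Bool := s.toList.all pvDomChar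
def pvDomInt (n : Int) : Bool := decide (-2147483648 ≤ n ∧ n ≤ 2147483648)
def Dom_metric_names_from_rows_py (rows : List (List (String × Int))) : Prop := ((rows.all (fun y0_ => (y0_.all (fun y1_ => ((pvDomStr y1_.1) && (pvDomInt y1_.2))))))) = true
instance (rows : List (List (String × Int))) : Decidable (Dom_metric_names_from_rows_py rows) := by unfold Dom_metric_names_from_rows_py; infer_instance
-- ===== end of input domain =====

-- B replaces A's per-key filtered set-building loop and its partition-then-extend output
-- (primaries in declared order, then sorted rest) by one flat key-set difference and a
-- single sort under a composite (rank, name) key; objective: alternative decomposition.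

-- module constants shared by both ports
def pvDefaultPrimary : List String :=
  ["factual_correctness", "faithfulness", "context_recall",
   "context_precision_without_reference"]

def pvStructural : PySem.Set String :=
  ["stage_name", "condition_name", "condition_slug", "repeat_index", "run_dir",
   "config_file", "preset_name", "condition_fingerprint", "rows",
   "duration_seconds", "failure_rate", "selected_max_workers"]

-- ===== PORT A =====
-- each row (a Python dict) arrives as an association list; row.keys() is
-- (PySem.Dict.ofList row).keys.  str(key) is the identity on the String keys of this
-- signature and is dropped.  'sorted(...)' consumes the set 'discovered' only through an
-- order-independent keyless sort, so the Set representation is exact here.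
def metric_names_from_rows_py (rows : List (List (String × Int))) : List String :=
  let discovered : PySem.Set String :=
    rows.foldl (fun disc row =>
      (PySem.Dict.ofList row).keys.foldl (fun disc key =>
        if PySem.Set.contains pvStructural key then disc else PySem.Set.add disc key) disc)
      PySem.Set.empty
  let ordered := pvDefaultPrimary.filter (fun name => PySem.Set.contains discovered name)
  ordered ++ PySem.List.sorted
      (discovered.filter (fun name => !pvDefaultPrimary.contains name)) (fun x => x) false

-- ===== PORT B =====
-- the Python tuple key (rank, name) is ported as the lexicographic order Lex (Int × String),
-- which is exactly Python's tuple comparison for these component types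
def metric_names_from_rows_py_alt (rows : List (List (String × Int))) : List String :=
  let discovered : PySem.Set String :=
    PySem.Set.diff
      (PySem.Set.ofList (rows.flatMap (fun row => (PySem.Dict.ofList row).keys)))
      pvStructural
  let rank : PySem.Dict String Int :=
    (PySem.List.enumerate pvDefaultPrimary).foldl
      (fun d p => PySem.Dict.insert d p.2 p.1) PySem.Dict.empty
  PySem.List.sorted discovered
    (fun name => toLex (PySem.Dict.getD rank name (pvDefaultPrimary.length : Int), name)) false

-- ===== PRECONDITION & SPEC =====
def Spec_metric_names_from_rows_py (rows : List (List (String × Int))) (out : List String) : Prop := out = metric_names_from_rows_py_alt rows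
instance (rows : List (List (String × Int))) (out : List String) : Decidable (Spec_metric_names_from_rows_py rows out) := by unfold Spec_metric_names_from_rows_py; infer_instance

-- ===== CLAIM (what is proved, stated in full; the proofs are below) =====
def Claim_equal_metric_names_from_rows_py : Prop := ∀ (rows : List (List (String × Int))), Dom_metric_names_from_rows_py rows → Spec_metric_names_from_rows_py rows (metric_names_from_rows_py rows)

-- ===== LEMMAS AND PROOFS =====

-- B's rank key, abbreviated for the proofs
def pvRankD (name : String) : Int :=
  PySem.Dict.getD
    ((PySem.List.enumerate pvDefaultPrimary).foldl
      (fun d p => PySem.Dict.insert d p.2 p.1) PySem.Dict.empty)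
    name (pvDefaultPrimary.length : Int)

def pvKeyB (name : String) : Lex (Int × String) := toLex (pvRankD name, name)

lemma pvRankD_not_mem (b : String) (hb : b ∉ pvDefaultPrimary) : pvRankD b = 4 := by
  simp only [pvDefaultPrimary, List.mem_cons, List.not_mem_nil, or_false, not_or] at hb
  obtain ⟨h1, h2, h3, h4⟩ := hb
  simp [pvRankD, pvDefaultPrimary, PySem.List.enumerate, PySem.Dict.insert, PySem.Dict.empty,
    PySem.Dict.getD, PySem.Dict.get?, List.find?,
    beq_eq_false_iff_ne.mpr (Ne.symm h1), beq_eq_false_iff_ne.mpr (Ne.symm h2),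
    beq_eq_false_iff_ne.mpr (Ne.symm h3), beq_eq_false_iff_ne.mpr (Ne.symm h4)]

lemma pvRankD_mem_lt (a : String) (ha : a ∈ pvDefaultPrimary) : pvRankD a < 4 := by
  fin_cases ha <;> decide

lemma pvKeyB_pairwise_primary :
    List.Pairwise (fun a b => pvKeyB a < pvKeyB b) pvDefaultPrimary := by
  decide

lemma foldl_flatMap {α β γ : Type} (f : γ → β → γ) (g : α → List β) (l : List α) (init : γ) :
    (l.flatMap g).foldl f init = l.foldl (fun acc x => (g x).foldl f acc) init := by
  induction l generalizing init with
  | nil => rfl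
  | cons x xs ih => simp [List.flatMap_cons, List.foldl_append, ih]

lemma foldl_skip_eq_filter (cont : String → Bool) (l : List String) (acc : PySem.Set String) :
    l.foldl (fun d k => if cont k then d else PySem.Set.add d k) acc
      = (l.filter (fun k => !cont k)).foldl PySem.Set.add acc := by
  induction l generalizing acc with
  | nil => rfl
  | cons x xs ih =>
    by_cases h : cont x = true <;> simp [h, ih]

lemma set_add_eq_if (a : List String) (y : String) :
    PySem.Set.add a y = if y ∈ a then a else a ++ [y] := by
  simp [PySem.Set.add, PySem.Set.contains]

lemma filter_set_add (q : String → Bool) (acc : List String) (x : String) :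
    (PySem.Set.add acc x).filter q
      = if q x then PySem.Set.add (acc.filter q) x else acc.filter q := by
  rw [set_add_eq_if, set_add_eq_if]
  by_cases hm : x ∈ acc
  · by_cases hq : q x = true
    · simp [hm, hq, List.mem_filter]
    · simp [hm, hq]
  · by_cases hq : q x = true
    · simp [hm, hq, List.filter_append, List.mem_filter]
    · simp [hm, hq, List.filter_append]

lemma filter_foldl_add (q : String → Bool) (l : List String) (acc : List String) :
    (l.foldl PySem.Set.add acc).filter q = (l.filter q).foldl PySem.Set.add (acc.filter q) := by
  induction l generalizing acc with
  | nil => rfl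
  | cons x xs ih =>
    simp only [List.foldl_cons, List.filter_cons]
    rw [ih, filter_set_add]
    by_cases hq : q x = true <;> simp [hq]

-- the two discovered sets coincide as lists
lemma discovered_eq (rows : List (List (String × Int))) :
    rows.foldl (fun disc row =>
      (PySem.Dict.ofList row).keys.foldl (fun disc key =>
        if PySem.Set.contains pvStructural key then disc else PySem.Set.add disc key) disc)
      PySem.Set.empty
    = PySem.Set.diff
        (PySem.Set.ofList (rows.flatMap (fun row => (PySem.Dict.ofList row).keys)))
        pvStructural := by
  rw [← foldl_flatMap]
  rw [foldl_skip_eq_filter (fun k => PySem.Set.contains pvStructural k)]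
  rw [PySem.Set.diff, PySem.Set.ofList_eq_foldl]
  rw [filter_foldl_add]
  rfl

-- ===== VERDICT (by name: the statement is the Claim_ definition above) =====
theorem metric_names_from_rows_py_spec : Claim_equal_metric_names_from_rows_py := by
  intro rows _
  unfold Spec_metric_names_from_rows_py
  show metric_names_from_rows_py rows = metric_names_from_rows_py_alt rows
  simp only [metric_names_from_rows_py, metric_names_from_rows_py_alt]
  rw [discovered_eq rows]
  set d : PySem.Set String :=
    PySem.Set.diff
      (PySem.Set.ofList (rows.flatMap (fun row => (PySem.Dict.ofList row).keys)))
      pvStructural with hd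
  have hdnodup : d.Nodup := by
    rw [hd, PySem.Set.diff]
    exact (PySem.Set.nodup_ofList _).filter _
  set s := PySem.List.sorted (d.filter (fun name => !pvDefaultPrimary.contains name))
      (fun x => x) false with hs
  have hsmem : ∀ x ∈ s, x ∉ pvDefaultPrimary := by
    intro x hx
    have : x ∈ d.filter (fun name => !pvDefaultPrimary.contains name) :=
      (PySem.List.sorted_perm _ _ _).mem_iff.mp hx
    simp only [List.mem_filter, Bool.not_eq_eq_eq_not, Bool.not_true,
      List.contains_eq_mem, decide_eq_false_iff_not] at this
    exact this.2
  have hperm : (pvDefaultPrimary.filter (fun name => PySem.Set.contains d name) ++ s).Perm d := by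
    have h1 : (pvDefaultPrimary.filter (fun name => PySem.Set.contains d name)).Perm
        (d.filter (fun name => pvDefaultPrimary.contains name)) := by
      apply (List.perm_ext_iff_of_nodup
        ((by decide : pvDefaultPrimary.Nodup).filter _) (hdnodup.filter _)).mpr
      intro a
      simp only [List.mem_filter, PySem.Set.contains,
        List.contains_eq_mem, decide_eq_true_eq]
      exact and_comm
    have h2 : s.Perm (d.filter (fun name => !pvDefaultPrimary.contains name)) :=
      PySem.List.sorted_perm _ _ _
    exact ((h1.append h2).trans (List.filter_append_perm _ d))
  refine (PySem.List.sorted_eq_of_perm_of_pairwise_lt _ _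
    (fun name => pvKeyB name) hperm ?_).symm
  rw [List.pairwise_append]
  refine ⟨?_, ?_, ?_⟩
  · exact pvKeyB_pairwise_primary.sublist List.filter_sublist
  · -- suffix: all ranks are the fallback 4, names strictly increasing
    have hle : List.Pairwise (fun a b : String => a ≤ b) s := by
      have := PySem.List.sorted_pairwise (d.filter (fun name => !pvDefaultPrimary.contains name))
        (fun x : String => x)
      simpa [hs] using this
    have hnd : s.Nodup := (PySem.List.sorted_perm _ _ _).nodup_iff.mpr (hdnodup.filter _)
    have hlt : List.Pairwise (fun a b : String => a < b) s := by
      refine (hle.and hnd).imp ?_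
      rintro a b ⟨h1, h2⟩; exact lt_of_le_of_ne h1 h2
    refine hlt.imp_of_mem ?_
    intro a b ha hb hab
    rw [Prod.Lex.lt_iff]
    right
    exact ⟨by simp [pvKeyB, pvRankD_not_mem a (hsmem a ha), pvRankD_not_mem b (hsmem b hb)],
      by simpa [pvKeyB] using hab⟩
  · -- a primary always precedes a non-primary: its rank is below the fallback 4
    intro a ha b hb
    have haP : a ∈ pvDefaultPrimary := (List.mem_filter.mp ha).1
    rw [Prod.Lex.lt_iff]
    left
    show pvRankD a < pvRankD b
    rw [pvRankD_not_mem b (hsmem b hb)]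
    exact pvRankD_mem_lt a haP
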